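-- pv_equiv track=rewrite | github.com/flapperz/bioinformatics | ros2/BetterBWMatching.py | CreateCountDict
-- ===== SOURCE A (Python) =====
-- alphabet = ['A','T','C', 'G', '$']
--
-- def CreateCountDict(lastcolumn):
--     count_dict = dict()
--     for eacha in alphabet:
--         count_dict[eacha] = [0] * (len(lastcolumn) + 1)
--     for i in range(len(lastcolumn)):
--         a_acid = lastcolumn[i]
--         for eacha in alphabet:
--             if eacha == a_acid:
--                 count_dict[eacha][i + 1] = count_dict[eacha][i] + 1
--             else:
--                 count_dict[eacha][i + 1] = count_dict[eacha][i]
--     return count_dict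
-- ===== SOURCE B (Python) =====
-- alphabet = ['A', 'T', 'C', 'G', '$']
--
--
-- def CreateCountDict(lastcolumn):
--     # Occurrence-position index + run-length expansion: one scan of the string
--     # records where each symbol occurs; each count array is then built purely
--     # from the gaps between consecutive occurrence positions.
--     positions = {sym: [] for sym in alphabet}
--     for i, c in enumerate(lastcolumn):
--         if c in positions:
--             positions[c].append(i)
--     n = len(lastcolumn)
--     count_dict = dict()
--     for sym in alphabet:
--         arr = []
--         prev = -1
--         for k, p in enumerate(positions[sym]):
--             arr += [k] * (p - prev)
--             prev = p
--         arr += [len(positions[sym])] * (n - prev)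
--         count_dict[sym] = arr
--     return count_dict
-- ===== Notes on version B (the rewrite author's own statement) =====
-- stated objective: faster
-- what changed: Replaces A's per-position counting (an inner alphabet scan copying counts forward through preallocated arrays) with an occurrence-position index built in one scan of the string plus per-symbol run-length expansion: each count array is produced from the gaps between consecutive occurrence positions, never re-reading the string; dropping the per-position work over all five symbols is the constant-factor win.
import Mathlib
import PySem

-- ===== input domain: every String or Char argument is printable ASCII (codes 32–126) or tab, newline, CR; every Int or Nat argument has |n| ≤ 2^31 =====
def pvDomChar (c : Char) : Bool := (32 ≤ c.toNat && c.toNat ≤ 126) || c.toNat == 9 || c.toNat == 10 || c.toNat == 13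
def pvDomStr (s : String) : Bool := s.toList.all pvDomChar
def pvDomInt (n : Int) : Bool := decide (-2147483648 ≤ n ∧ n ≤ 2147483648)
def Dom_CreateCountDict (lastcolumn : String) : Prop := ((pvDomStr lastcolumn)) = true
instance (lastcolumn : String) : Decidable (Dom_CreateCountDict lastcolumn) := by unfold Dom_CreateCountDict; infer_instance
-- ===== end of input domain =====

-- B replaces A's per-position counting loop by an occurrence-position index built in
-- one scan plus a run-length expansion of each symbol's position gaps; same results.


-- ===== PORT A =====
def alphabetBW : List String := ["A", "T", "C", "G", "$"]

-- Literal port of A: preallocate [0]*(n+1) per symbol, then for each position i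
-- scan the alphabet and copy the count forward (with +1 on the matching symbol).
-- The Python accesses lastcolumn[i], l[i] and the store l[i+1] = … always in range,
-- so the pyGetD/pySetD defaults are never used.
def CreateCountDict (lastcolumn : String) : List (String × List Int) :=
  let cs := lastcolumn.toList
  let d0 : PySem.Dict String (List Int) :=
    alphabetBW.foldl (fun d eacha => d.insert eacha (List.replicate (cs.length + 1) 0))
      PySem.Dict.empty
  let d :=
    (PySem.List.pyRange 0 (cs.length : Int) 1).foldl
      (fun d i =>
        let a_acid : String := String.ofList [PySem.List.pyGetD cs i ' ']
        alphabetBW.foldl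
          (fun d eacha =>
            if eacha == a_acid then
              d.modify eacha [] (fun l => PySem.List.pySetD l (i + 1) (PySem.List.pyGetD l i 0 + 1))
            else
              d.modify eacha [] (fun l => PySem.List.pySetD l (i + 1) (PySem.List.pyGetD l i 0)))
          d)
      d0
  d.items

-- ===== PORT B =====
-- B first pass: positions = {sym: []}; for i, c in enumerate(lastcolumn): if c in positions: positions[c].append(i)
def posDictBW (cs : List Char) : PySem.Dict String (List Int) :=
  (PySem.List.enumerate cs).foldl
    (fun d ic =>
      let s := String.ofList [ic.2]
      if d.contains s then d.modify s [] (fun l => l ++ [ic.1]) else d)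
    (alphabetBW.foldl (fun d sym => d.insert sym []) PySem.Dict.empty)

-- B per-symbol expansion: arr = []; prev = -1; for k, p in enumerate(ps): arr += [k]*(p-prev); prev = p
-- then arr += [len(ps)]*(n-prev).  ([k]*(m) with m ≤ 0 is [] in Python; .toNat matches.)
def expandBW (n : Int) (ps : List Int) : List Int :=
  let st :=
    (PySem.List.enumerate ps).foldl
      (fun (st : List Int × Int) kp => (st.1 ++ List.replicate (kp.2 - st.2).toNat kp.1, kp.2))
      ([], -1)
  st.1 ++ List.replicate (n - st.2).toNat (ps.length : Int)

def CreateCountDict_alt (lastcolumn : String) : List (String × List Int) :=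
  let positions := posDictBW lastcolumn.toList
  let n : Int := (lastcolumn.toList.length : Int)
  (alphabetBW.foldl
      (fun d sym => d.insert sym (expandBW n (positions.getD sym [])))
      (PySem.Dict.empty : PySem.Dict String (List Int))).items

-- ===== PRECONDITION & SPEC =====
def Spec_CreateCountDict (lastcolumn : String) (out : List (String × List Int)) : Prop := out = CreateCountDict_alt lastcolumn
instance (lastcolumn : String) (out : List (String × List Int)) : Decidable (Spec_CreateCountDict lastcolumn out) := by unfold Spec_CreateCountDict; infer_instance

-- ===== CLAIM (what is proved, stated in full; the proofs are below) =====
def Claim_equal_CreateCountDict : Prop := ∀ (lastcolumn : String), Dom_CreateCountDict lastcolumn → Spec_CreateCountDict lastcolumn (CreateCountDict lastcolumn)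

-- ===== LEMMAS AND PROOFS =====

-- the prefix-count array both programs compute for a symbol, cut off at position k
def pfxBW (sym : String) (cs : List Char) (k : Nat) : List Int :=
  (List.range (k + 1)).map (fun j => ((cs.take j).countP (fun c => sym == String.ofList [c]) : Int))

theorem length_pfxBW (sym : String) (cs : List Char) (k : Nat) :
    (pfxBW sym cs k).length = k + 1 := by simp [pfxBW]

-- appending one character extends the full prefix-count array by the new total
theorem pfxBW_snoc (sym : String) (cs : List Char) (c : Char) :
    pfxBW sym (cs ++ [c]) (cs ++ [c]).length
    = pfxBW sym cs cs.length
      ++ [(List.countP (fun x => sym == String.ofList [x]) (cs ++ [c]) : Int)] := by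
  unfold pfxBW
  rw [List.length_append, List.length_singleton, List.range_succ, List.map_append]
  congr 1
  · exact List.map_congr_left (fun j hj => by
      rw [List.take_append_of_le_length (by simpa using Nat.lt_succ_iff.mp (List.mem_range.mp hj))])
  · have ht : List.take (cs.length + 1) (cs ++ [c]) = cs ++ [c] :=
      List.take_of_length_le (by simp)
    simp only [List.map_cons, List.map_nil, ht]

-- A's two branches are one dict.modify with an if inside the stored value
theorem branch_mergeBW (d : PySem.Dict String (List Int)) (k a_acid : String) (i : Int) :
    (if k == a_acid then
        d.modify k [] (fun l => PySem.List.pySetD l (i + 1) (PySem.List.pyGetD l i 0 + 1))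
      else
        d.modify k [] (fun l => PySem.List.pySetD l (i + 1) (PySem.List.pyGetD l i 0)))
    = d.modify k [] (fun l =>
        PySem.List.pySetD l (i + 1) (PySem.List.pyGetD l i 0 + if k == a_acid then 1 else 0)) := by
  by_cases h : k == a_acid <;> simp [h]

-- modify on the concrete 5-key dict of the loop states
theorem modifyBW (k : String) (f : List Int → List Int) (va vt vc vg vd : List Int)
    (h : k ∈ alphabetBW) :
    (PySem.Dict.mk [("A", va), ("T", vt), ("C", vc), ("G", vg), ("$", vd)]).modify k [] f
    = PySem.Dict.mk [("A", if k = "A" then f va else va), ("T", if k = "T" then f vt else vt),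
        ("C", if k = "C" then f vc else vc), ("G", if k = "G" then f vg else vg),
        ("$", if k = "$" then f vd else vd)] := by
  fin_cases h <;>
    simp [PySem.Dict.modify, PySem.Dict.insert, PySem.Dict.getD, PySem.Dict.get?,
      PySem.Dict.contains]

-- one position of A's loop: the inner alphabet scan updates every array at index i+1
theorem inner_foldBW (a_acid : String) (i : Int) (va vt vc vg vd : List Int) :
    alphabetBW.foldl
      (fun d eacha =>
        if eacha == a_acid then
          d.modify eacha [] (fun l => PySem.List.pySetD l (i + 1) (PySem.List.pyGetD l i 0 + 1))
        else
          d.modify eacha [] (fun l => PySem.List.pySetD l (i + 1) (PySem.List.pyGetD l i 0)))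
      (PySem.Dict.mk [("A", va), ("T", vt), ("C", vc), ("G", vg), ("$", vd)])
    = PySem.Dict.mk [
        ("A", PySem.List.pySetD va (i+1) (PySem.List.pyGetD va i 0 + if "A" == a_acid then 1 else 0)),
        ("T", PySem.List.pySetD vt (i+1) (PySem.List.pyGetD vt i 0 + if "T" == a_acid then 1 else 0)),
        ("C", PySem.List.pySetD vc (i+1) (PySem.List.pyGetD vc i 0 + if "C" == a_acid then 1 else 0)),
        ("G", PySem.List.pySetD vg (i+1) (PySem.List.pyGetD vg i 0 + if "G" == a_acid then 1 else 0)),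
        ("$", PySem.List.pySetD vd (i+1) (PySem.List.pyGetD vd i 0 + if "$" == a_acid then 1 else 0))] := by
  simp only [alphabetBW, List.foldl, branch_mergeBW]
  rw [modifyBW "A" _ _ _ _ _ _ (by decide)]
  rw [modifyBW "T" _ _ _ _ _ _ (by decide)]
  rw [modifyBW "C" _ _ _ _ _ _ (by decide)]
  rw [modifyBW "G" _ _ _ _ _ _ (by decide)]
  rw [modifyBW "$" _ _ _ _ _ _ (by decide)]
  simp

-- stored-value update at one position, for one symbol's array
theorem value_stepBW (sym : String) (cs : List Char) (k : Nat) (hk : k < cs.length) :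
    PySem.List.pySetD (pfxBW sym cs k ++ List.replicate (cs.length - k) 0) ((k : Int) + 1)
      (PySem.List.pyGetD (pfxBW sym cs k ++ List.replicate (cs.length - k) 0) (k : Int) 0
        + (if sym == String.ofList [cs[k]] then 1 else 0))
    = pfxBW sym cs (k + 1) ++ List.replicate (cs.length - (k + 1)) 0 := by
  have hget : PySem.List.pyGetD (pfxBW sym cs k ++ List.replicate (cs.length - k) 0) (k : Int) 0
      = ((cs.take k).countP (fun c => sym == String.ofList [c]) : Int) := by
    rw [PySem.List.pyGetD_natCast]
    rw [List.getD_eq_getElem?_getD, List.getElem?_append_left (by simp [length_pfxBW])]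
    simp [pfxBW]
  have hrep : List.replicate (cs.length - k) (0 : Int)
      = 0 :: List.replicate (cs.length - (k + 1)) 0 := by
    rw [← List.replicate_succ]
    congr 1
    omega
  have hcast : ((k : Int) + 1) = ((k + 1 : Nat) : Int) := by push_cast; ring
  rw [hget, hcast, PySem.List.pySetD_natCast, hrep]
  rw [List.set_append_right _ _ (by simp [length_pfxBW])]
  have hpfx : pfxBW sym cs (k + 1) = pfxBW sym cs k
      ++ [((cs.take k).countP (fun c => sym == String.ofList [c]) : Int)
          + if sym == String.ofList [cs[k]] then 1 else 0] := by
    unfold pfxBW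
    rw [List.range_succ, List.map_append]
    congr 1
    simp only [List.map_cons, List.map_nil]
    rw [List.take_add_one, List.getElem?_eq_getElem hk]
    simp only [Option.toList_some, List.countP_append, List.countP_cons, List.countP_nil]
    push_cast
    split_ifs with h1 <;> simp_all
  rw [hpfx]
  simp [length_pfxBW]

-- A's dict after processing the first k positions
theorem A_invariantBW (cs : List Char) (k : Nat) (hk : k ≤ cs.length) :
    (PySem.List.pyRange 0 (k : Int) 1).foldl
      (fun d i =>
        let a_acid : String := String.ofList [PySem.List.pyGetD cs i ' ']
        alphabetBW.foldl
          (fun d eacha =>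
            if eacha == a_acid then
              d.modify eacha [] (fun l => PySem.List.pySetD l (i + 1) (PySem.List.pyGetD l i 0 + 1))
            else
              d.modify eacha [] (fun l => PySem.List.pySetD l (i + 1) (PySem.List.pyGetD l i 0)))
          d)
      (alphabetBW.foldl (fun d eacha => d.insert eacha (List.replicate (cs.length + 1) 0))
        PySem.Dict.empty)
    = PySem.Dict.mk [
        ("A", pfxBW "A" cs k ++ List.replicate (cs.length - k) 0),
        ("T", pfxBW "T" cs k ++ List.replicate (cs.length - k) 0),
        ("C", pfxBW "C" cs k ++ List.replicate (cs.length - k) 0),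
        ("G", pfxBW "G" cs k ++ List.replicate (cs.length - k) 0),
        ("$", pfxBW "$" cs k ++ List.replicate (cs.length - k) 0)] := by
  induction k with
  | zero =>
    rw [PySem.List.pyRange_one_eq_nil (by omega)]
    simp [alphabetBW, List.foldl, PySem.Dict.insert, PySem.Dict.contains, PySem.Dict.empty,
      pfxBW, List.replicate_succ]
  | succ k ih =>
    have hk' : k < cs.length := by omega
    have hchar : PySem.List.pyGetD cs (k : Int) ' ' = cs[k] := by
      rw [PySem.List.pyGetD_natCast]
      exact List.getD_eq_getElem cs ' ' hk'
    have hsplit : PySem.List.pyRange 0 ((k + 1 : Nat) : Int) 1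
        = PySem.List.pyRange 0 (k : Int) 1 ++ [(k : Int)] := by
      push_cast
      exact PySem.List.pyRange_one_succ_right (by omega)
    rw [hsplit, List.foldl_append, ih (by omega)]
    rw [List.foldl_cons, List.foldl_nil]
    simp only [hchar]
    rw [inner_foldBW]
    simp only [value_stepBW _ cs k hk']

-- ---- B-side lemmas ----

-- reference positions list: indices of sym's occurrences, in order
def posnsBW (sym : String) (cs : List Char) : List Int :=
  ((PySem.List.enumerate cs).filter (fun p => String.ofList [p.2] == sym)).map (·.1)

theorem posnsBW_snoc (sym : String) (cs : List Char) (c : Char) :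
    posnsBW sym (cs ++ [c])
    = posnsBW sym cs ++ (if String.ofList [c] == sym then [(cs.length : Int)] else []) := by
  unfold posnsBW
  rw [PySem.List.enumerate_append, List.filter_append, List.map_append]
  by_cases h : String.ofList [c] == sym <;>
    simp [PySem.List.enumerate, h]

theorem length_posnsBW (sym : String) (cs : List Char) :
    (posnsBW sym cs).length = cs.countP (fun c => sym == String.ofList [c]) := by
  induction cs using List.reverseRecOn with
  | nil => simp [posnsBW, PySem.List.enumerate]
  | append_singleton cs c ih =>
    rw [posnsBW_snoc, List.length_append, ih, List.countP_append]
    rw [Bool.beq_comm (a := String.ofList [c])]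
    by_cases h : sym == String.ofList [c] <;> simp [h]

-- the one-pass scan builds exactly the per-symbol position lists
theorem posDictBW_eq (cs : List Char) :
    posDictBW cs
    = PySem.Dict.mk [("A", posnsBW "A" cs), ("T", posnsBW "T" cs), ("C", posnsBW "C" cs),
        ("G", posnsBW "G" cs), ("$", posnsBW "$" cs)] := by
  induction cs using List.reverseRecOn with
  | nil =>
    simp [posDictBW, posnsBW, PySem.List.enumerate, alphabetBW, List.foldl,
      PySem.Dict.insert, PySem.Dict.contains, PySem.Dict.empty]
  | append_singleton cs c ih =>
    unfold posDictBW at ih ⊢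
    rw [PySem.List.enumerate_append, List.foldl_append, ih]
    simp only [PySem.List.enumerate, List.foldl_cons, List.foldl_nil]
    simp only [posnsBW_snoc]
    by_cases hA : String.ofList [c] = "A"
    · rw [hA]; rw [show (PySem.Dict.mk [("A", posnsBW "A" cs), ("T", posnsBW "T" cs),
        ("C", posnsBW "C" cs), ("G", posnsBW "G" cs), ("$", posnsBW "$" cs)]).contains "A" = true
        from by simp [PySem.Dict.contains]]
      simp only [if_true]
      rw [modifyBW "A" _ _ _ _ _ _ (by decide)]
      simp
    · by_cases hT : String.ofList [c] = "T"
      · rw [hT]; rw [show (PySem.Dict.mk [("A", posnsBW "A" cs), ("T", posnsBW "T" cs),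
          ("C", posnsBW "C" cs), ("G", posnsBW "G" cs), ("$", posnsBW "$" cs)]).contains "T" = true
          from by simp [PySem.Dict.contains]]
        simp only [if_true]
        rw [modifyBW "T" _ _ _ _ _ _ (by decide)]
        simp
      · by_cases hC : String.ofList [c] = "C"
        · rw [hC]; rw [show (PySem.Dict.mk [("A", posnsBW "A" cs), ("T", posnsBW "T" cs),
            ("C", posnsBW "C" cs), ("G", posnsBW "G" cs), ("$", posnsBW "$" cs)]).contains "C" = true
            from by simp [PySem.Dict.contains]]
          simp only [if_true]
          rw [modifyBW "C" _ _ _ _ _ _ (by decide)]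
          simp
        · by_cases hG : String.ofList [c] = "G"
          · rw [hG]; rw [show (PySem.Dict.mk [("A", posnsBW "A" cs), ("T", posnsBW "T" cs),
              ("C", posnsBW "C" cs), ("G", posnsBW "G" cs), ("$", posnsBW "$" cs)]).contains "G" = true
              from by simp [PySem.Dict.contains]]
            simp only [if_true]
            rw [modifyBW "G" _ _ _ _ _ _ (by decide)]
            simp
          · by_cases hD : String.ofList [c] = "$"
            · rw [hD]; rw [show (PySem.Dict.mk [("A", posnsBW "A" cs), ("T", posnsBW "T" cs),
                ("C", posnsBW "C" cs), ("G", posnsBW "G" cs), ("$", posnsBW "$" cs)]).contains "$" = true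
                from by simp [PySem.Dict.contains]]
              simp only [if_true]
              rw [modifyBW "$" _ _ _ _ _ _ (by decide)]
              simp
            · have hcon : (PySem.Dict.mk [("A", posnsBW "A" cs), ("T", posnsBW "T" cs),
                  ("C", posnsBW "C" cs), ("G", posnsBW "G" cs), ("$", posnsBW "$" cs)]).contains
                    (String.ofList [c]) = false := by
                simp [PySem.Dict.contains]
                exact ⟨fun h => hA h.symm, fun h => hT h.symm, fun h => hC h.symm,
                  fun h => hG h.symm, fun h => hD h.symm⟩
              rw [hcon]
              simp
              exact ⟨hA, hT, hC, hG, hD⟩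

-- the run-length expansion of a symbol's positions is its full prefix-count array
theorem expandBW_eq (sym : String) (cs : List Char) :
    expandBW (cs.length : Int) (posnsBW sym cs) = pfxBW sym cs cs.length := by
  suffices h : ∀ cs : List Char,
      (((PySem.List.enumerate (posnsBW sym cs)).foldl
        (fun (st : List Int × Int) kp =>
          (st.1 ++ List.replicate (kp.2 - st.2).toNat kp.1, kp.2)) ([], -1)).2 < (cs.length : Int))
      ∧ expandBW (cs.length : Int) (posnsBW sym cs) = pfxBW sym cs cs.length by
    exact (h cs).2
  intro cs
  induction cs using List.reverseRecOn with
  | nil =>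
    constructor
    · simp [posnsBW, PySem.List.enumerate]
    · simp [expandBW, posnsBW, PySem.List.enumerate, pfxBW]
  | append_singleton cs c ih =>
    obtain ⟨hlt, heq⟩ := ih
    set F := ((PySem.List.enumerate (posnsBW sym cs)).foldl
        (fun (st : List Int × Int) kp =>
          (st.1 ++ List.replicate (kp.2 - st.2).toNat kp.1, kp.2)) ([], -1)) with hF
    have hcnt : (List.countP (fun x => sym == String.ofList [x]) (cs ++ [c]) : Int)
        = if (String.ofList [c] == sym) then
            (List.countP (fun x => sym == String.ofList [x]) cs : Int) + 1
          else (List.countP (fun x => sym == String.ofList [x]) cs : Int) := by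
      rw [List.countP_append, Bool.beq_comm (a := String.ofList [c])]
      split_ifs with h <;> simp [h]
    by_cases hmatch : String.ofList [c] == sym
    · -- position cs.length is appended
      rw [posnsBW_snoc, if_pos hmatch]
      have henum : PySem.List.enumerate (posnsBW sym cs ++ [(cs.length : Int)])
          = PySem.List.enumerate (posnsBW sym cs)
            ++ [(((posnsBW sym cs).length : Int), (cs.length : Int))] := by
        rw [PySem.List.enumerate_append]
        simp [PySem.List.enumerate]
      constructor
      · rw [henum, List.foldl_append, ← hF]
        simp only [List.foldl_cons, List.foldl_nil, List.length_append, List.length_singleton]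
        push_cast
        omega
      · unfold expandBW
        rw [henum, List.foldl_append, ← hF]
        simp only [List.foldl_cons, List.foldl_nil]
        have h1 : ((cs ++ [c]).length : Int) - (cs.length : Int) = 1 := by
          simp only [List.length_append, List.length_singleton]; push_cast; ring
        rw [h1]
        simp only [Int.toNat_one, List.replicate_one]
        have hlen : (posnsBW sym cs ++ [(cs.length : Int)]).length
            = (posnsBW sym cs).length + 1 := by simp
        rw [hlen, pfxBW_snoc]
        have hexp : F.1 ++ List.replicate ((cs.length : Int) - F.2).toNat
            ((posnsBW sym cs).length : Int) = pfxBW sym cs cs.length := heq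
        rw [List.append_assoc, ← hexp]
        rw [hcnt, if_pos hmatch, ← length_posnsBW]
        push_cast
        rw [List.append_assoc]
    · rw [posnsBW_snoc, if_neg hmatch, List.append_nil]
      constructor
      · rw [← hF]
        simp only [List.length_append, List.length_singleton]
        push_cast
        omega
      · unfold expandBW
        rw [← hF]
        show F.1 ++ List.replicate (((cs ++ [c]).length : Int) - F.2).toNat
            ((posnsBW sym cs).length : Int) = pfxBW sym (cs ++ [c]) (cs ++ [c]).length
        have h2 : (((cs ++ [c]).length : Int) - F.2).toNat
            = ((cs.length : Int) - F.2).toNat + 1 := by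
          simp only [List.length_append, List.length_singleton]
          push_cast
          omega
        rw [h2, List.replicate_succ' , ← List.append_assoc]
        have hexp : F.1 ++ List.replicate ((cs.length : Int) - F.2).toNat
            ((posnsBW sym cs).length : Int) = pfxBW sym cs cs.length := heq
        rw [hexp, pfxBW_snoc, hcnt, if_neg hmatch, ← length_posnsBW]

-- ===== VERDICT (by name: the statement is the Claim_ definition above) =====
theorem CreateCountDict_spec : Claim_equal_CreateCountDict := by
  intro s _
  unfold Spec_CreateCountDict
  simp only [CreateCountDict, CreateCountDict_alt]
  rw [A_invariantBW s.toList s.toList.length le_rfl]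
  rw [posDictBW_eq]
  simp only [alphabetBW, List.foldl, PySem.Dict.insert, PySem.Dict.contains, PySem.Dict.empty,
    PySem.Dict.getD, PySem.Dict.get?]
  simp
  have h : ∀ sym : String, pfxBW sym s.toList s.toList.length
      = expandBW (s.toList.length : Int) (posnsBW sym s.toList) :=
    fun sym => (expandBW_eq sym s.toList).symm
  exact ⟨h "A", h "T", h "C", h "G", h "$"⟩
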